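-- pv_equiv track=rewrite | github.com/dastarruer/dotfiles | scripts/rename_dotfiles_to_home_manager.py | replace_outside_quotes
-- ===== SOURCE A (Python) =====
-- def replace_outside_quotes(text):
--     out = []
--     i = 0
--     n = len(text)
--     in_single = False
--     in_double = False
--     while i < n:
--         ch = text[i]
--         if ch == "'" and not in_double:
--             out.append(ch)
--             in_single = not in_single
--             i += 1
--             continue
--         if ch == '"' and not in_single:
--             out.append(ch)
--             in_double = not in_double
--             i += 1
--             continue
--         if in_single or in_double:
--             out.append(ch)
--             i += 1
--             continue
--         # outside quotes: attempt replacements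
--         if text.startswith('config.dotfiles', i):
--             out.append('config.home-manager')
--             i += len('config.dotfiles')
--             continue
--         # Replace dotfiles. -> home-manager. but avoid changing paths like '/.dotfiles' or '~/.'
--         if text.startswith('dotfiles.', i):
--             prev = text[i-1] if i-1 >= 0 else ''
--             if prev not in ('/', '~'):
--                 out.append('home-manager.')
--                 i += len('dotfiles.')
--                 continue
--         # also replace occurrences of 'config.dotfiles' even if inside strings in a later pass
--         out.append(ch)
--         i += 1
--     return ''.join(out)
-- ===== SOURCE B (Python) =====
-- def replace_outside_quotes(text):
--     n = len(text)
--     # pass 1: mask[i] is True exactly where a replacement may be attempted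
--     mask = []
--     in_single = in_double = False
--     for ch in text:
--         if ch == "'" and not in_double:
--             mask.append(False)
--             in_single = not in_single
--         elif ch == '"' and not in_single:
--             mask.append(False)
--             in_double = not in_double
--         else:
--             mask.append(not in_single and not in_double)
--     # pass 2: walk the original text, replacing only where the mask allows
--     out = []
--     i = 0
--     while i < n:
--         if mask[i]:
--             if text.startswith('config.dotfiles', i):
--                 out.append('config.home-manager')
--                 i += 15
--                 continue
--             if text.startswith('dotfiles.', i) and (i == 0 or text[i-1] not in ('/', '~')):
--                 out.append('home-manager.')
--                 i += 9
--                 continue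
--         out.append(text[i])
--         i += 1
--     return ''.join(out)
-- ===== Notes on version B (the rewrite author's own statement) =====
-- stated objective: alternative
-- what changed: A's single interleaved quote-tracking/replacing state machine is split into two passes: a quote-state scan that builds a per-character outside-quotes mask, then a mask-guided index walk over the original text that applies the replacements.
import Mathlib
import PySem

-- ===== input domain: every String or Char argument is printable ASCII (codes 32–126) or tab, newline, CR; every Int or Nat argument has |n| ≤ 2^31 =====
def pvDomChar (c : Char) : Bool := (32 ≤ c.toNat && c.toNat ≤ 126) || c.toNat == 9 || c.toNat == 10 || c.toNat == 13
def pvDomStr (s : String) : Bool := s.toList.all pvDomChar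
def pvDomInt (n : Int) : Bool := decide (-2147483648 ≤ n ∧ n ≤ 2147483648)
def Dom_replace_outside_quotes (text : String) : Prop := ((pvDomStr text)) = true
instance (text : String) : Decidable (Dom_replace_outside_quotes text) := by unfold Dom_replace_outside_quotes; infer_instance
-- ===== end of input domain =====

-- B replaces A's single interleaved quote/replace state machine by two passes: a quote-state
-- scan producing an outside-quotes mask, then a mask-guided replacement walk (objective: alternative).

-- ===== PORT A =====
-- the two tokens and their replacements, as character lists
def pvTokC : List Char := "config.dotfiles".toList
def pvRepC : List Char := "config.home-manager".toList
def pvTokD : List Char := "dotfiles.".toList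
def pvRepD : List Char := "home-manager.".toList

-- A's while loop: index i, quote flags, branches in A's order
-- fuel only makes the recursion structural; cs.length steps always suffice since i grows each turn
def pvLoopA (cs : List Char) (fuel : Nat) (i : Nat) (s d : Bool) : List Char :=
  match fuel with
  | 0 => []
  | fuel + 1 =>
    if h : i < cs.length then
      if cs[i] = '\'' ∧ !d then cs[i] :: pvLoopA cs fuel (i+1) (!s) d
      else if cs[i] = '"' ∧ !s then cs[i] :: pvLoopA cs fuel (i+1) s (!d)
      else if s || d then cs[i] :: pvLoopA cs fuel (i+1) s d
      else if pvTokC.isPrefixOf (cs.drop i) then pvRepC ++ pvLoopA cs fuel (i+15) s d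
      else if pvTokD.isPrefixOf (cs.drop i) ∧
              (i = 0 ∨ (cs.getD (i-1) ' ' ≠ '/' ∧ cs.getD (i-1) ' ' ≠ '~')) then
        pvRepD ++ pvLoopA cs fuel (i+9) s d
      else cs[i] :: pvLoopA cs fuel (i+1) s d
    else []

def replace_outside_quotes (text : String) : String :=
  String.ofList (pvLoopA text.toList text.toList.length 0 false false)

-- ===== PORT B =====
-- pass 1: quote-state scan producing, per character, whether a replacement may be attempted there
def pvMaskB (cs : List Char) (s d : Bool) : List Bool :=
  match cs with
  | [] => []
  | ch :: rest =>
    if ch = '\'' ∧ !d then false :: pvMaskB rest (!s) d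
    else if ch = '"' ∧ !s then false :: pvMaskB rest s (!d)
    else (!s && !d) :: pvMaskB rest s d

-- pass 2: mask-guided replacement walk over the original characters
-- fuel only makes the recursion structural; cs.length steps always suffice since i grows each turn
def pvLoopB (cs : List Char) (mask : List Bool) (fuel : Nat) (i : Nat) : List Char :=
  match fuel with
  | 0 => []
  | fuel + 1 =>
    if h : i < cs.length then
      if mask.getD i false then
        if pvTokC.isPrefixOf (cs.drop i) then pvRepC ++ pvLoopB cs mask fuel (i+15)
        else if pvTokD.isPrefixOf (cs.drop i) ∧
                (i = 0 ∨ (cs.getD (i-1) ' ' ≠ '/' ∧ cs.getD (i-1) ' ' ≠ '~')) then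
          pvRepD ++ pvLoopB cs mask fuel (i+9)
        else cs[i] :: pvLoopB cs mask fuel (i+1)
      else cs[i] :: pvLoopB cs mask fuel (i+1)
    else []

def replace_outside_quotes_alt (text : String) : String :=
  String.ofList (pvLoopB text.toList (pvMaskB text.toList false false) text.toList.length 0)

-- ===== PRECONDITION & SPEC =====
def Spec_replace_outside_quotes (text : String) (out : String) : Prop := out = replace_outside_quotes_alt text
instance (text : String) (out : String) : Decidable (Spec_replace_outside_quotes text out) := by unfold Spec_replace_outside_quotes; infer_instance

-- ===== CLAIM (what is proved, stated in full; the proofs are below) =====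
def Claim_equal_replace_outside_quotes : Prop := ∀ (text : String), Dom_replace_outside_quotes text → Spec_replace_outside_quotes text (replace_outside_quotes text)

-- ===== LEMMAS AND PROOFS =====

-- one step of the quote-state machine
def pvStep : Bool × Bool → Char → Bool × Bool
  | (s, d), ch =>
    if ch = '\'' ∧ !d then (!s, d)
    else if ch = '"' ∧ !s then (s, !d)
    else (s, d)

-- the mask entry at i: the scan state at i is outside both quotes and cs[i] is not a quote char
lemma pvMask_getD (cs : List Char) : ∀ (i : Nat) (s d : Bool) (h : i < cs.length),
    (pvMaskB cs s d).getD i false =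
      (!((cs.take i).foldl pvStep (s, d)).1 && !((cs.take i).foldl pvStep (s, d)).2
        && !decide (cs[i] = '\'') && !decide (cs[i] = '"')) := by
  induction cs with
  | nil => intro i s d h; simp at h
  | cons ch rest ih =>
    intro i s d h
    match i with
    | 0 =>
      simp only [List.take_zero, List.foldl_nil, List.getElem_cons_zero, pvMaskB]
      by_cases h1 : ch = '\'' ∧ !d
      · rw [if_pos h1, List.getD_cons_zero]; simp [h1.1]
      · by_cases h2 : ch = '"' ∧ !s
        · rw [if_neg h1, if_pos h2, List.getD_cons_zero]; simp [h2.1]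
        · rw [if_neg h1, if_neg h2, List.getD_cons_zero]
          cases s with
          | true => simp
          | false =>
            cases d with
            | true => simp
            | false =>
              have hq1 : ¬ ch = '\'' := fun hq => h1 ⟨hq, rfl⟩
              have hq2 : ¬ ch = '"' := fun hq => h2 ⟨hq, rfl⟩
              simp [hq1, hq2]
    | j+1 =>
      have hj : j < rest.length := by simpa using h
      simp only [pvMaskB, List.take_succ_cons, List.foldl_cons, List.getElem_cons_succ]
      by_cases h1 : ch = '\'' ∧ !d
      · have hp : pvStep (s, d) ch = (!s, d) := by
          simp only [pvStep]; rw [if_pos h1]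
        rw [if_pos h1, List.getD_cons_succ, ih j (!s) d hj, hp]
        rfl
      · by_cases h2 : ch = '"' ∧ !s
        · have hp : pvStep (s, d) ch = (s, !d) := by
            simp only [pvStep]; rw [if_neg h1, if_pos h2]
          rw [if_neg h1, if_pos h2, List.getD_cons_succ, ih j s (!d) hj, hp]
          rfl
        · have hp : pvStep (s, d) ch = (s, d) := by
            simp only [pvStep]; rw [if_neg h1, if_neg h2]
          rw [if_neg h1, if_neg h2, List.getD_cons_succ, ih j s d hj, hp]
          rfl

-- stepping over any character of either token leaves the state unchanged
lemma pvStep_tokC (p : Bool × Bool) : pvTokC.foldl pvStep p = p := by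
  cases p with | mk a b => cases a <;> cases b <;> decide

lemma pvStep_tokD (p : Bool × Bool) : pvTokD.foldl pvStep p = p := by
  cases p with | mk a b => cases a <;> cases b <;> decide

-- a prefix match pins down the take of the drop
lemma pvPrefix_take {tok cs : List Char} {i : Nat} (h : tok.isPrefixOf (cs.drop i)) :
    (cs.drop i).take tok.length = tok := by
  have := (List.isPrefixOf_iff_prefix).mp h
  exact (List.prefix_iff_eq_take.mp this).symm

lemma pvTake_add_tok {tok cs : List Char} {i : Nat} (h : tok.isPrefixOf (cs.drop i)) :
    cs.take (i + tok.length) = cs.take i ++ tok := by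
  rw [List.take_add, pvPrefix_take h]

-- main invariant: A's loop at (i, s, d), with (s, d) the plain-scan state at i, equals B's walk at i
lemma pvLoop_eq (cs : List Char) : ∀ (fuel i : Nat) (s d : Bool),
    (s, d) = (cs.take i).foldl pvStep (false, false) →
    pvLoopA cs fuel i s d = pvLoopB cs (pvMaskB cs false false) fuel i := by
  intro fuel
  induction fuel with
  | zero => intro i s d _; rfl
  | succ k ih =>
    intro i s d hst
    by_cases hi : i < cs.length
    · have htake : cs.take (i+1) = cs.take i ++ [cs[i]] := by
        rw [List.take_add_one]
        simp [List.getElem?_eq_getElem hi]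
      have hstep : (cs.take (i+1)).foldl pvStep (false, false) = pvStep (s, d) cs[i] := by
        rw [htake, List.foldl_append, ← hst, List.foldl_cons, List.foldl_nil]
      have hmask := pvMask_getD cs i false false hi
      rw [← hst] at hmask
      simp only [pvLoopA, pvLoopB]
      rw [dif_pos hi, dif_pos hi]
      by_cases h1 : cs[i] = '\'' ∧ !d
      · have hm : (pvMaskB cs false false).getD i false = false := by
          rw [hmask]; simp [h1.1]
        rw [if_pos h1, hm, if_neg (show ¬ (false = true) by simp)]
        congr 1
        refine ih (i+1) (!s) d ?_
        rw [hstep]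
        simp only [pvStep]; rw [if_pos h1]
      · by_cases h2 : cs[i] = '"' ∧ !s
        · have hm : (pvMaskB cs false false).getD i false = false := by
            rw [hmask]; simp [h2.1]
          rw [if_neg h1, if_pos h2, hm, if_neg (show ¬ (false = true) by simp)]
          congr 1
          refine ih (i+1) s (!d) ?_
          rw [hstep]
          simp only [pvStep]; rw [if_neg h1, if_pos h2]
        · by_cases h3 : s || d
          · have hm : (pvMaskB cs false false).getD i false = false := by
              rw [hmask]
              cases s with
              | true => simp
              | false =>
                cases d with
                | true => simp
                | false => simp at h3
            rw [if_neg h1, if_neg h2, if_pos h3, hm, if_neg (show ¬ (false = true) by simp)]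
            congr 1
            refine ih (i+1) s d ?_
            rw [hstep]
            simp only [pvStep]; rw [if_neg h1, if_neg h2]
          · have h3' : (s || d) = false := by revert h3; cases s <;> cases d <;> simp
            obtain ⟨hs, hd⟩ := Bool.or_eq_false_iff.mp h3'
            subst hs; subst hd
            have hq1 : ¬ cs[i] = '\'' := fun hq => h1 ⟨hq, rfl⟩
            have hq2 : ¬ cs[i] = '"' := fun hq => h2 ⟨hq, rfl⟩
            have hm : (pvMaskB cs false false).getD i false = true := by
              rw [hmask]; simp [hq1, hq2]
            rw [if_neg h1, if_neg h2, if_neg h3, hm, if_pos rfl]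
            by_cases h4 : pvTokC.isPrefixOf (cs.drop i)
            · rw [if_pos h4, if_pos h4]
              congr 1
              refine ih (i+15) false false ?_
              have hlen : pvTokC.length = 15 := by decide
              have ht := pvTake_add_tok h4
              rw [hlen] at ht
              rw [ht, List.foldl_append, ← hst, pvStep_tokC]
            · rw [if_neg h4, if_neg h4]
              by_cases h5 : pvTokD.isPrefixOf (cs.drop i) ∧
                  (i = 0 ∨ (cs.getD (i-1) ' ' ≠ '/' ∧ cs.getD (i-1) ' ' ≠ '~'))
              · rw [if_pos h5, if_pos h5]
                congr 1
                refine ih (i+9) false false ?_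
                have hlen : pvTokD.length = 9 := by decide
                have ht := pvTake_add_tok h5.1
                rw [hlen] at ht
                rw [ht, List.foldl_append, ← hst, pvStep_tokD]
              · rw [if_neg h5, if_neg h5]
                congr 1
                refine ih (i+1) false false ?_
                rw [hstep]
                simp only [pvStep]; rw [if_neg h1, if_neg h2]
    · simp only [pvLoopA, pvLoopB]
      simp [hi]

-- ===== VERDICT (by name: the statement is the Claim_ definition above) =====
theorem replace_outside_quotes_spec : Claim_equal_replace_outside_quotes := by
  intro text _
  show _ = _
  unfold replace_outside_quotes replace_outside_quotes_alt
  congr 1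
  exact pvLoop_eq text.toList text.toList.length 0 false false (by simp)
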